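-- pv_equiv track=rewrite | github.com/akulikova64/BERT_CNN_comparison | src/python/process_nanobody_data.py | reorder_cnn_data
-- ===== SOURCE A (Python) =====
-- def reorder_cnn_data(reference, nn_data):
--   ref_pos_with_gap = []
--
--   for i, aa in enumerate(reference):
--     if aa == "-":
--       ref_pos_with_gap.append(i)
--
--   for pos in ref_pos_with_gap:
--     nn_data.insert(pos, ["NA", "NA", "NA", "NA", "NA"])
--
--   return nn_data
-- ===== SOURCE B (Python) =====
-- # B: single-pass merge over the reference, emitting NA rows at gap positions,
-- # instead of A's repeated list.insert.
-- # Note: A mutates nn_data in place; B builds a new list — the equivalence is about the return value.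
-- def reorder_cnn_data(reference, nn_data):
--     na_row = ["NA", "NA", "NA", "NA", "NA"]
--     out = []
--     j = 0
--     n = len(nn_data)
--     for i, aa in enumerate(reference):
--         if aa == "-":
--             while len(out) < i and j < n:
--                 out.append(nn_data[j])
--                 j += 1
--             out.append(list(na_row))
--     out.extend(nn_data[j:])
--     return out
-- ===== Notes on version B (the rewrite author's own statement) =====
-- stated objective: alternative
-- what changed: A collects gap indices and then calls list.insert at each (each insert shifts the whole tail); B does one left-to-right merge over the reference, copying data rows and emitting NA rows at gap positions into a new list.
import Mathlib
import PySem

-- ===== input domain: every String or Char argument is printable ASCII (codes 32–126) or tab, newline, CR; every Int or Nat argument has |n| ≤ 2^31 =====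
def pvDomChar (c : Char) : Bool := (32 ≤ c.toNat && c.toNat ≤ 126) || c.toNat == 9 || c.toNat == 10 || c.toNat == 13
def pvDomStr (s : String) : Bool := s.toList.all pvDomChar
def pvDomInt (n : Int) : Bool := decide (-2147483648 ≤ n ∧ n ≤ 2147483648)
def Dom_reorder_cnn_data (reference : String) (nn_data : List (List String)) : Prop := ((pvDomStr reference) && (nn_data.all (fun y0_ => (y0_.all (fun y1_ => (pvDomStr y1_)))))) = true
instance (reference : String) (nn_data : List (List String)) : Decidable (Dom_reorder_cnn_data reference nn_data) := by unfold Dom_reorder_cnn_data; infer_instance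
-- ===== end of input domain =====

-- B replaces A's repeated list.insert at each gap position with a single left-to-right
-- merge emitting "NA" rows at gap indices (alternative single-pass strategy). A mutates
-- nn_data in place (insert); B builds a new list — the equivalence proved is about the
-- RETURN value only.

def pvNA : List String := ["NA", "NA", "NA", "NA", "NA"]

-- ===== PORT A =====
def reorder_cnn_data (reference : String) (nn_data : List (List String)) : List (List String) :=
  let ref_pos_with_gap :=
    (PySem.List.enumerate reference.toList).foldl
      (fun acc p => if p.2 = '-' then acc ++ [p.1] else acc) ([] : List Int)
  ref_pos_with_gap.foldl (fun d pos => PySem.List.insert d pos pvNA) nn_data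

-- ===== PORT B =====
-- the inner `while len(out) < i and j < n: out.append(nn_data[j]); j += 1` of Source B;
-- nn_data[j] with 0 ≤ j < n is exactly List.getD here (index always in range).
def pvFill (nn : List (List String)) (i : Int) (out : List (List String)) (j : Nat) :
    List (List String) × Nat :=
  if (out.length : Int) < i ∧ j < nn.length then
    pvFill nn i (out ++ [nn.getD j []]) (j + 1)
  else (out, j)
termination_by nn.length - j

def reorder_cnn_data_alt (reference : String) (nn_data : List (List String)) : List (List String) :=
  let st := (PySem.List.enumerate reference.toList).foldl
      (fun (st : List (List String) × Nat) p =>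
        if p.2 = '-' then
          let f := pvFill nn_data p.1 st.1 st.2
          (f.1 ++ [pvNA], f.2)
        else st)
      (([] : List (List String)), 0)
  -- nn_data[j:] with 0 ≤ j ≤ len(nn_data) is exactly List.drop
  st.1 ++ nn_data.drop st.2

-- ===== PRECONDITION & SPEC =====
def Spec_reorder_cnn_data (reference : String) (nn_data : List (List String)) (out : List (List String)) : Prop := out = reorder_cnn_data_alt reference nn_data
instance (reference : String) (nn_data : List (List String)) (out : List (List String)) : Decidable (Spec_reorder_cnn_data reference nn_data out) := by unfold Spec_reorder_cnn_data; infer_instance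

-- ===== CLAIM (what is proved, stated in full; the proofs are below) =====
def Claim_equal_reorder_cnn_data : Prop := ∀ (reference : String) (nn_data : List (List String)), Dom_reorder_cnn_data reference nn_data → Spec_reorder_cnn_data reference nn_data (reorder_cnn_data reference nn_data)

-- ===== LEMMAS AND PROOFS =====

-- Python's list.insert clamps an over-long position to an append.
theorem pvInsert_ge {α : Type} (xs : List α) (p : Int) (v : α)
    (h : (xs.length : Int) ≤ p) : PySem.List.insert xs p v = xs ++ [v] := by
  have hp : ¬ p < 0 := by omega
  have hmin : min p (xs.length : Int) = (xs.length : Int) := by omega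
  simp [PySem.List.insert, PySem.List.sliceIndices, hp, hmin]

-- invariants of the inner while-loop: it fills `out` from nn without changing
-- `out ++ nn.drop j`, stops at length i or when nn is exhausted, never overshoots.
theorem pvFill_spec (nn : List (List String)) (i : Int) (out : List (List String)) (j : Nat)
    (hj : j ≤ nn.length) (hout : (out.length : Int) ≤ i) :
    (pvFill nn i out j).1 ++ nn.drop (pvFill nn i out j).2 = out ++ nn.drop j ∧
    (pvFill nn i out j).2 ≤ nn.length ∧
    ((pvFill nn i out j).1.length : Int) ≤ i ∧
    (((pvFill nn i out j).1.length : Int) = i ∨ (pvFill nn i out j).2 = nn.length) := by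
  fun_induction pvFill nn i out j with
  | case1 out j hcond ih =>
      obtain ⟨hlt, hjn⟩ := hcond
      have hdrop : nn.drop j = nn[j] :: nn.drop (j + 1) := List.drop_eq_getElem_cons hjn
      have hget : nn.getD j [] = nn[j] := by
        simp [List.getD, List.getElem?_eq_getElem hjn]
      have ih' := ih (by omega) (by simp; omega)
      refine ⟨?_, ih'.2.1, ih'.2.2.1, ih'.2.2.2⟩
      rw [ih'.1, hget, hdrop]
      simp
  | case2 out j hcond =>
      refine ⟨rfl, hj, hout, ?_⟩
      by_cases h1 : (out.length : Int) = i
      · exact Or.inl h1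
      · right; omega

-- A's two loops restructured: folding insert over the collected gap list equals
-- interleaving the inserts into the enumerate fold.
theorem pvGapsFold (ps : List (Int × Char)) (acc : List Int) (d : List (List String)) :
    (ps.foldl (fun acc p => if p.2 = '-' then acc ++ [p.1] else acc) acc).foldl
      (fun d pos => PySem.List.insert d pos pvNA) d
    = ps.foldl (fun d p => if p.2 = '-' then PySem.List.insert d p.1 pvNA else d)
        (acc.foldl (fun d pos => PySem.List.insert d pos pvNA) d) := by
  induction ps generalizing acc d with
  | nil => rfl
  | cons p ps ih =>
      simp only [List.foldl_cons]
      by_cases hp : p.2 = '-'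
      · simp only [hp, reduceIte]
        rw [ih (acc ++ [p.1]) d, List.foldl_append, List.foldl_cons, List.foldl_nil]
      · simp only [if_neg hp]
        exact ih acc d

-- the single-pass merge maintains: produced-so-far ++ unconsumed-rest equals
-- A's interleaved-insert fold on the same enumerate pairs.
theorem pvMerge (nn : List (List String)) (cs : List Char) (s : Int)
    (out : List (List String)) (j : Nat)
    (hj : j ≤ nn.length) (hout : (out.length : Int) ≤ s) :
    (((PySem.List.enumerate cs s).foldl
        (fun (st : List (List String) × Nat) p =>
          if p.2 = '-' then
            let f := pvFill nn p.1 st.1 st.2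
            (f.1 ++ [pvNA], f.2)
          else st) (out, j)).1
      ++ nn.drop ((PySem.List.enumerate cs s).foldl
        (fun (st : List (List String) × Nat) p =>
          if p.2 = '-' then
            let f := pvFill nn p.1 st.1 st.2
            (f.1 ++ [pvNA], f.2)
          else st) (out, j)).2)
    = (PySem.List.enumerate cs s).foldl
        (fun d p => if p.2 = '-' then PySem.List.insert d p.1 pvNA else d)
        (out ++ nn.drop j) := by
  induction cs generalizing s out j with
  | nil => simp [PySem.List.enumerate_nil]
  | cons c cs ih =>
      rw [PySem.List.enumerate_cons]
      simp only [List.foldl_cons]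
      by_cases hc : c = '-'
      · subst hc
        simp only [reduceIte]
        obtain ⟨hpre, hj', hle, hstop⟩ := pvFill_spec nn s out j hj hout
        set o' := (pvFill nn s out j).1 with ho'
        set j' := (pvFill nn s out j).2 with hj'def
        have hins : PySem.List.insert (out ++ nn.drop j) s pvNA = o' ++ pvNA :: nn.drop j' := by
          rw [← hpre]
          rcases hstop with heq | hend
          · have hs : s = ((o'.length : Nat) : Int) := heq.symm
            rw [hs, PySem.List.insert_natCast _ _ _ (by simp)]
            simp
          · have hdrop : nn.drop j' = [] := by
              rw [hend]; simp
            rw [hdrop, List.append_nil, pvInsert_ge _ _ _ hle]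
        rw [hins]
        have hnew : o' ++ pvNA :: nn.drop j' = (o' ++ [pvNA]) ++ nn.drop j' := by simp
        rw [hnew]
        exact ih (s + 1) (o' ++ [pvNA]) j' hj' (by simp; omega)
      · simp only [if_neg hc]
        exact ih (s + 1) out j hj (by omega)

-- ===== VERDICT (by name: the statement is the Claim_ definition above) =====
theorem reorder_cnn_data_spec : Claim_equal_reorder_cnn_data := by
  intro reference nn_data _hdom
  unfold Spec_reorder_cnn_data reorder_cnn_data reorder_cnn_data_alt
  simp only []
  rw [pvGapsFold]
  simp only [List.foldl_nil]
  have h := pvMerge nn_data reference.toList 0 [] 0 (by omega) (by simp)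
  simp only [List.drop_zero, List.nil_append] at h
  exact h.symm
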